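-- pv_equiv track=rewrite | github.com/k-min9/TIL | 00. Daily Algorithm/COS/Pro 2회차/06.py | solution
-- ===== SOURCE A (Python) =====
-- def solution(commands):
-- 	answer = [0, 0]
-- 	for c in commands:
-- 		if c == "U":
-- 			answer[1] += 1
-- 		elif c == "D":
-- 			answer[1] -= 1
-- 		elif c == "R":
-- 			answer[0] += 1
-- 		elif c == "L":
-- 			answer[0] -= 1
-- 	return answer
-- ===== SOURCE B (Python) =====
-- def solution(commands):
--     cnt = {}
--     for c in commands:
--         cnt[c] = cnt.get(c, 0) + 1
--     return [cnt.get("R", 0) - cnt.get("L", 0), cnt.get("U", 0) - cnt.get("D", 0)]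
-- ===== Notes on version B (the rewrite author's own statement) =====
-- stated objective: alternative
-- what changed: Replaces the per-command four-way branch updating a mutable [x,y] with a one-pass character frequency table followed by branch-free arithmetic cnt[R]-cnt[L], cnt[U]-cnt[D].
import Mathlib
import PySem

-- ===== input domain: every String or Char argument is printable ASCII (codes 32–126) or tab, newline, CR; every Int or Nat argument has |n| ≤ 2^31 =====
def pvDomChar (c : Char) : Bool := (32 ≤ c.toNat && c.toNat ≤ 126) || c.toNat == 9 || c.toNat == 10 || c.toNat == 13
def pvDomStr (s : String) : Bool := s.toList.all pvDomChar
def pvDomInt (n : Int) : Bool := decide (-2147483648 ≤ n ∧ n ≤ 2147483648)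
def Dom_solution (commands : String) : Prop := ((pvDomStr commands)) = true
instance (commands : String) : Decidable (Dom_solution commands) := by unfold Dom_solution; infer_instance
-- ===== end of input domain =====

-- B replaces A's per-command four-way branch on a mutable [x,y] with a one-pass
-- character frequency table followed by branch-free arithmetic (alternative decomposition).

-- ===== PORT A =====
-- answer = [0,0]; for c in commands: if/elif chain mutating answer[1]/answer[0]
def solution (commands : String) : List Int :=
  let answer :=
    commands.toList.foldl
      (fun (answer : Int × Int) c =>
        if c = 'U' then (answer.1, answer.2 + 1)
        else if c = 'D' then (answer.1, answer.2 - 1)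
        else if c = 'R' then (answer.1 + 1, answer.2)
        else if c = 'L' then (answer.1 - 1, answer.2)
        else answer)
      (0, 0)
  [answer.1, answer.2]

-- ===== PORT B =====
-- cnt = {}; for c in commands: cnt[c] = cnt.get(c, 0) + 1; then arithmetic over buckets
def solution_alt (commands : String) : List Int :=
  let cnt : PySem.Dict Char Int :=
    commands.toList.foldl (fun d c => d.modify c 0 (· + 1)) PySem.Dict.empty
  [cnt.getD 'R' 0 - cnt.getD 'L' 0, cnt.getD 'U' 0 - cnt.getD 'D' 0]

-- ===== PRECONDITION & SPEC =====
def Spec_solution (commands : String) (out : List Int) : Prop := out = solution_alt commands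
instance (commands : String) (out : List Int) : Decidable (Spec_solution commands out) := by unfold Spec_solution; infer_instance

-- ===== CLAIM (what is proved, stated in full; the proofs are below) =====
def Claim_equal_solution : Prop := ∀ (commands : String), Dom_solution commands → Spec_solution commands (solution commands)

-- ===== LEMMAS AND PROOFS =====
theorem solution_foldl_char (l : List Char) (x y : Int) :
    l.foldl
      (fun (answer : Int × Int) c =>
        if c = 'U' then (answer.1, answer.2 + 1)
        else if c = 'D' then (answer.1, answer.2 - 1)
        else if c = 'R' then (answer.1 + 1, answer.2)
        else if c = 'L' then (answer.1 - 1, answer.2)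
        else answer)
      (x, y)
    = (x + l.count 'R' - l.count 'L', y + l.count 'U' - l.count 'D') := by
  induction l generalizing x y with
  | nil => simp
  | cons c t ih =>
    by_cases hU : c = 'U' <;> by_cases hD : c = 'D' <;> by_cases hR : c = 'R' <;>
      by_cases hL : c = 'L' <;>
      simp_all <;> omega

-- ===== VERDICT (by name: the statement is the Claim_ definition above) =====
theorem solution_spec : Claim_equal_solution := by
  intro commands _
  unfold Spec_solution solution solution_alt
  rw [← PySem.Dict.counter_eq_foldl]
  simp [solution_foldl_char, PySem.Dict.getD_counter]
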